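-- pv_equiv track=rewrite | github.com/ribbas/music-genre-nw | parser/clean.py | strip_annotations
-- ===== SOURCE A (Python) =====
-- def strip_annotations(category_values_list: list) -> list:
--
--     for ix in range(len(category_values_list)):
--         category_values_list[ix] = "".join(
--             s.split("]")[-1] for s in category_values_list[ix].split("[")
--         )
--         category_values_list[ix] = "".join(
--             s.split(")")[-1] for s in category_values_list[ix].split("(")
--         )
--     return category_values_list
-- ===== SOURCE B (Python) =====
-- def _strip_pass(s, opener, closer):
--     # right-to-left scan: a closer turns suppression on, an opener turns it off,
--     # other characters are kept only while suppression is off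
--     kept = []
--     suppress = False
--     for ch in reversed(s):
--         if ch == closer:
--             suppress = True
--         elif ch == opener:
--             suppress = False
--         elif not suppress:
--             kept.append(ch)
--     return "".join(reversed(kept))
--
--
-- def strip_annotations(category_values_list: list) -> list:
--     for ix in range(len(category_values_list)):
--         category_values_list[ix] = _strip_pass(
--             _strip_pass(category_values_list[ix], "[", "]"), "(", ")"
--         )
--     return category_values_list
-- ===== Notes on version B (the rewrite author's own statement) =====
-- stated objective: alternative
-- what changed: Replaces each split('[')/split(']')[-1]/join pipeline with a single right-to-left character scan per delimiter pair, keeping a character only while a suppress flag (set by a closer, cleared by an opener) is off.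
import Mathlib
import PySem

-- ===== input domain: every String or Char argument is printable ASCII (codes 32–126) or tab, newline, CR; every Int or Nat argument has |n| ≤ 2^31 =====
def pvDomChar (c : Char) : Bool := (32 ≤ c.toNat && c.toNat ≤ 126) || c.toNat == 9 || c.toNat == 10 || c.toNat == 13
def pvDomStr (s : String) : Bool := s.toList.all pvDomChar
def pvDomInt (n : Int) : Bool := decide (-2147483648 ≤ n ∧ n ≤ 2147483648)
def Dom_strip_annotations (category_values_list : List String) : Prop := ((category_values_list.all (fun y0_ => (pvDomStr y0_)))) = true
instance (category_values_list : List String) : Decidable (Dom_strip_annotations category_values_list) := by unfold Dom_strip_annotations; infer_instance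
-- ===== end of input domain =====

-- B replaces A's split/join pipelines with a single right-to-left suppress-flag scan per
-- delimiter pair (alternative decomposition, same cost); A mutates its argument in place,
-- B performs the same in-place mutation in Python — the Lean claim is about the return value.


-- ===== PORT A =====
-- "".join(s.split(cls)[-1] for s in x.split(opn))
def stripPassA (opn cls : Char) (cs : List Char) : List Char :=
  PySem.Chars.join []
    ((PySem.Chars.splitOn cs [opn]).map
      (fun seg => PySem.List.pyGetD (PySem.Chars.splitOn seg [cls]) (-1) []))

def strip_annotations (category_values_list : List String) : List String :=
  category_values_list.map
    (fun x => String.ofList (stripPassA '(' ')' (stripPassA '[' ']' x.toList)))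

-- ===== PORT B =====
-- right-to-left scan with a suppress flag; kept chars are appended and reversed at the end
def stripPassB (opn cls : Char) (cs : List Char) : List Char :=
  (cs.reverse.foldl
    (fun st ch =>
      if ch = cls then (st.1, true)
      else if ch = opn then (st.1, false)
      else if st.2 then st
      else (st.1 ++ [ch], st.2))
    (([] : List Char), false)).1.reverse

def strip_annotations_alt (category_values_list : List String) : List String :=
  category_values_list.map
    (fun x => String.ofList (stripPassB '(' ')' (stripPassB '[' ']' x.toList)))

-- ===== PRECONDITION & SPEC =====
def Spec_strip_annotations (category_values_list : List String) (out : List String) : Prop := out = strip_annotations_alt category_values_list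
instance (category_values_list : List String) (out : List String) : Decidable (Spec_strip_annotations category_values_list out) := by unfold Spec_strip_annotations; infer_instance

-- ===== CLAIM (what is proved, stated in full; the proofs are below) =====
def Claim_equal_strip_annotations : Prop := ∀ (category_values_list : List String), Dom_strip_annotations category_values_list → Spec_strip_annotations category_values_list (strip_annotations category_values_list)

-- ===== LEMMAS AND PROOFS =====

-- reference recursion for splitting on a single separator character
def splitRec (d : Char) : List Char → List (List Char)
  | [] => [[]]
  | c :: cs => if c = d then [] :: splitRec d cs else (splitRec d cs).modifyHead (c :: ·)

-- suppress flag as seen at the front of the string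
def flagR (opn cls : Char) : List Char → Bool
  | [] => false
  | c :: cs => if c = cls then true else if c = opn then false else flagR opn cls cs

-- the common value of both passes
def passR (opn cls : Char) : List Char → List Char
  | [] => []
  | c :: cs =>
      if c = cls then passR opn cls cs
      else if c = opn then passR opn cls cs
      else if flagR opn cls cs then passR opn cls cs
      else c :: passR opn cls cs

-- suffix after the last occurrence of d
def lastSegR (d : Char) : List Char → List Char
  | [] => []
  | c :: cs => if c = d ∨ d ∈ cs then lastSegR d cs else c :: lastSegR d cs

lemma splitRec_ne_nil (d : Char) (cs : List Char) : splitRec d cs ≠ [] := by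
  cases cs with
  | nil => simp [splitRec]
  | cons c cs =>
      simp only [splitRec]
      split
      · simp
      · cases h : splitRec d cs with
        | nil => exact absurd h (splitRec_ne_nil d cs)
        | cons a r => simp

lemma go_single (d : Char) : ∀ (l : List Char) (fuel : Nat) (cur : List Char)
    (acc : List (List Char)), l.length ≤ fuel →
    PySem.Chars.splitOn.go [d] fuel l cur acc
      = acc.reverse ++ (splitRec d l).modifyHead (cur.reverse ++ ·) := by
  intro l
  induction l with
  | nil =>
      intro fuel cur acc _
      cases fuel <;> simp [PySem.Chars.splitOn.go, splitRec]
  | cons c rest ih =>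
      intro fuel cur acc hf
      cases fuel with
      | zero => simp at hf
      | succ fuel =>
          by_cases hc : c = d
          · subst hc
            have h1 : [c].isPrefixOf (c :: rest) = true := by simp [List.isPrefixOf]
            have hf' : rest.length ≤ fuel := by simp at hf; omega
            simp only [PySem.Chars.splitOn.go, h1, if_true]
            rw [show List.drop [c].length (c :: rest) = rest from rfl,
              ih fuel [] (cur.reverse :: acc) hf']
            cases hsr : splitRec c rest with
            | nil => exact absurd hsr (splitRec_ne_nil c rest)
            | cons a r => simp [splitRec, hsr]
          · have h1 : [d].isPrefixOf (c :: rest) = false := by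
              simp [List.isPrefixOf]; exact fun h => absurd h.symm hc
            simp only [PySem.Chars.splitOn.go, h1] at *
            rw [if_neg (by simp), ih fuel (c :: cur) acc (by simpa using Nat.le_of_succ_le_succ hf)]
            obtain ⟨s0, r, hs⟩ : ∃ s0 r, splitRec d rest = s0 :: r := by
              cases h : splitRec d rest with
              | nil => exact absurd h (splitRec_ne_nil d rest)
              | cons a r => exact ⟨a, r, rfl⟩
            simp [splitRec, hc, hs]

lemma splitOn_eq_splitRec (d : Char) (cs : List Char) :
    PySem.Chars.splitOn cs [d] = splitRec d cs := by
  have := go_single d cs (cs.length + 1) [] [] (by omega)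
  simp only [PySem.Chars.splitOn] at *
  rw [this]
  obtain ⟨s0, r, hs⟩ : ∃ s0 r, splitRec d cs = s0 :: r := by
    cases h : splitRec d cs with
    | nil => exact absurd h (splitRec_ne_nil d cs)
    | cons a r => exact ⟨a, r, rfl⟩
  simp [hs]

lemma lastSegR_of_not_mem (d : Char) (cs : List Char) (h : d ∉ cs) :
    lastSegR d cs = cs := by
  induction cs with
  | nil => rfl
  | cons c cs ih =>
      simp only [List.mem_cons, not_or] at h
      simp [lastSegR, Ne.symm h.1, h.2, ih h.2]

lemma splitRec_of_not_mem (d : Char) (cs : List Char) (h : d ∉ cs) :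
    splitRec d cs = [cs] := by
  induction cs with
  | nil => rfl
  | cons c cs ih =>
      simp only [List.mem_cons, not_or] at h
      simp [splitRec, Ne.symm h.1, ih h.2]

lemma splitRec_of_mem (d : Char) (cs : List Char) (h : d ∈ cs) :
    ∃ s0 s1 r, splitRec d cs = s0 :: s1 :: r := by
  induction cs with
  | nil => simp at h
  | cons c cs ih =>
      by_cases hc : c = d
      · subst hc
        obtain ⟨s0, r, hs⟩ : ∃ s0 r, splitRec c cs = s0 :: r := by
          cases h : splitRec c cs with
          | nil => exact absurd h (splitRec_ne_nil c cs)
          | cons a r => exact ⟨a, r, rfl⟩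
        exact ⟨[], s0, r, by simp [splitRec, hs]⟩
      · have hm : d ∈ cs := by
          rcases List.mem_cons.mp h with h | h
          · exact absurd h.symm hc
          · exact h
        obtain ⟨s0, s1, r, hs⟩ := ih hm
        exact ⟨c :: s0, s1, r, by simp [splitRec, hc, hs]⟩

lemma getLast_splitRec (d : Char) (cs : List Char) :
    (splitRec d cs).getLast (splitRec_ne_nil d cs) = lastSegR d cs := by
  induction cs with
  | nil => rfl
  | cons c cs ih =>
      by_cases hc : c = d
      · subst hc
        have : splitRec c (c :: cs) = [] :: splitRec c cs := by simp [splitRec]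
        rw [List.getLast_congr _ (by simp) this, List.getLast_cons (splitRec_ne_nil c cs), ih]
        simp [lastSegR]
      · by_cases hm : d ∈ cs
        · obtain ⟨s0, s1, r, hs⟩ := splitRec_of_mem d cs hm
          have h2 : splitRec d (c :: cs) = (c :: s0) :: s1 :: r := by
            simp [splitRec, hc, hs]
          rw [List.getLast_congr _ (by simp) h2, List.getLast_cons (by simp)]
          rw [List.getLast_congr _ (by simp) hs, List.getLast_cons (by simp)] at ih
          simp [lastSegR, hm, ih]
        · have h2 : splitRec d (c :: cs) = [c :: cs] := by
            simp [splitRec, hc, splitRec_of_not_mem d cs hm]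
          rw [List.getLast_congr _ (by simp) h2]
          simp [lastSegR, hc, hm, lastSegR_of_not_mem d cs hm]

lemma flagR_eq_mem_head (opn cls : Char) (hne : opn ≠ cls) :
    ∀ (cs : List Char) (s0 : List Char) (r : List (List Char)),
      splitRec opn cs = s0 :: r → flagR opn cls cs = decide (cls ∈ s0) := by
  intro cs
  induction cs with
  | nil => intro s0 r h; simp [splitRec] at h; simp [flagR, h.1]
  | cons c cs ih =>
      intro s0 r h
      by_cases hc : c = opn
      · subst hc
        simp [splitRec] at h
        simp [flagR, hne, h.1]
      · obtain ⟨t0, tr, ht⟩ : ∃ t0 tr, splitRec opn cs = t0 :: tr := by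
          cases hh : splitRec opn cs with
          | nil => exact absurd hh (splitRec_ne_nil opn cs)
          | cons a r => exact ⟨a, r, rfl⟩
        rw [show splitRec opn (c :: cs) = (c :: t0) :: tr by simp [splitRec, hc, ht]] at h
        obtain ⟨h1, h2⟩ := List.cons_eq_cons.mp h
        subst h1
        by_cases hcl : c = cls
        · subst hcl; simp [flagR]
        · simp [flagR, hcl, hc, ih t0 tr ht, Ne.symm hcl]

lemma pyGetD_splitRec_neg_one (d : Char) (s : List Char) :
    PySem.List.pyGetD (PySem.Chars.splitOn s [d]) (-1) [] = lastSegR d s := by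
  rw [splitOn_eq_splitRec]
  cases hsp : splitRec d s with
  | nil => exact absurd hsp (splitRec_ne_nil d s)
  | cons a r =>
      rw [PySem.List.pyGetD_neg_one (a :: r) [] (List.cons_ne_nil a r),
        List.getLast_congr (List.cons_ne_nil a r) (splitRec_ne_nil d s) hsp.symm]
      exact getLast_splitRec d s

lemma join_empty_sep (parts : List (List Char)) :
    PySem.Chars.join [] parts = parts.flatten := by
  induction parts with
  | nil => simp [PySem.Chars.join, List.intercalate]
  | cons p ps ih =>
      cases ps with
      | nil => simp [PySem.Chars.join, List.intercalate]
      | cons q r =>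
          simp only [PySem.Chars.join, List.intercalate, List.intersperse_cons₂,
            List.flatten_cons] at *
          simp [ih]

-- A's pass equals the reference recursion
lemma stripPassA_eq_passR (opn cls : Char) (hne : opn ≠ cls) (cs : List Char) :
    stripPassA opn cls cs = passR opn cls cs := by
  have key : ∀ (l : List Char),
      ((splitRec opn l).map (fun seg => lastSegR cls seg)).flatten = passR opn cls l := by
    intro l
    induction l with
    | nil => simp [splitRec, lastSegR, passR]
    | cons c l ih =>
        obtain ⟨s0, r, hs⟩ : ∃ s0 r, splitRec opn l = s0 :: r := by
          cases hh : splitRec opn l with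
          | nil => exact absurd hh (splitRec_ne_nil opn l)
          | cons a r => exact ⟨a, r, rfl⟩
        by_cases hc : c = opn
        · subst hc
          rw [show splitRec c (c :: l) = [] :: splitRec c l from by simp [splitRec],
            List.map_cons, List.flatten_cons,
            show lastSegR cls [] = [] from rfl, List.nil_append,
            show passR c cls (c :: l) = passR c cls l from by simp [passR, hne]]
          exact ih
        · rw [show splitRec opn (c :: l) = (c :: s0) :: r from by simp [splitRec, hc, hs],
            List.map_cons, List.flatten_cons]
          rw [hs, List.map_cons, List.flatten_cons] at ih
          have hflag := flagR_eq_mem_head opn cls hne l s0 r hs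
          by_cases hcl : c = cls
          · subst hcl
            rw [show lastSegR c (c :: s0) = lastSegR c s0 from by simp [lastSegR],
              show passR opn c (c :: l) = passR opn c l from by simp [passR]]
            exact ih
          · by_cases hm : cls ∈ s0
            · rw [show lastSegR cls (c :: s0) = lastSegR cls s0 from by simp [lastSegR, hm],
                show passR opn cls (c :: l) = passR opn cls l from by
                  simp [passR, hcl, hc, hflag, hm]]
              exact ih
            · rw [show lastSegR cls (c :: s0) = c :: lastSegR cls s0 from by
                  simp [lastSegR, hcl, hm],
                show passR opn cls (c :: l) = c :: passR opn cls l from by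
                  simp [passR, hcl, hc, hflag, hm],
                List.cons_append, ih]
  unfold stripPassA
  rw [splitOn_eq_splitRec]
  simp only [pyGetD_splitRec_neg_one, join_empty_sep]
  exact key cs

-- B's scan equals the reference recursion
lemma stripPassB_eq_passR (opn cls : Char) (cs : List Char) :
    stripPassB opn cls cs = passR opn cls cs := by
  have key : ∀ l : List Char,
      l.reverse.foldl
        (fun st ch =>
          if ch = cls then (st.1, true)
          else if ch = opn then (st.1, false)
          else if st.2 then st
          else (st.1 ++ [ch], st.2))
        (([] : List Char), false)
        = ((passR opn cls l).reverse, flagR opn cls l) := by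
    intro l
    induction l with
    | nil => simp [passR, flagR]
    | cons c l ih =>
        rw [List.reverse_cons, List.foldl_append, ih]
        by_cases h1 : c = cls
        · simp [h1, passR, flagR]
        · by_cases h2 : c = opn
          · subst h2; simp [h1, passR, flagR]
          · by_cases h3 : flagR opn cls l
            · simp [h1, h2, h3, passR, flagR]
            · simp [h1, h2, h3, passR, flagR]
  unfold stripPassB
  rw [key]
  simp

lemma stripPass_eq (opn cls : Char) (hne : opn ≠ cls) (cs : List Char) :
    stripPassA opn cls cs = stripPassB opn cls cs := by
  rw [stripPassA_eq_passR opn cls hne, stripPassB_eq_passR]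

-- ===== VERDICT (by name: the statement is the Claim_ definition above) =====
theorem strip_annotations_spec : Claim_equal_strip_annotations := by
  intro l _
  unfold Spec_strip_annotations strip_annotations strip_annotations_alt
  apply List.map_congr_left
  intro x _
  rw [stripPass_eq '[' ']' (by decide), stripPass_eq '(' ')' (by decide)]
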